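-- pv_equiv track=rewrite | github.com/Aguss261/ApiFlask | src/service/hamburguesaService.py | validar_ingredientes
-- ===== SOURCE A (Python) =====
-- def validar_ingredientes(ingredientes):
--     required_fields = ["bacon", "huevo", "pepino", "tomate", "cebolla", "lechuga"]
--
--     # Verificar si todos los ingredientes requeridos est치n presentes
--     for field in required_fields:
--         if field not in ingredientes:
--             return False
--
--     # Verificar si hay ingredientes adicionales no permitidos
--     for field in ingredientes:
--         if field not in required_fields:
--             return False
--
--     return True
-- ===== SOURCE B (Python) =====
-- def validar_ingredientes(ingredientes):
--     required = {"bacon", "huevo", "pepino", "tomate", "cebolla", "lechuga"}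
--     vistos = set()
--     for field in ingredientes:
--         if field not in required:
--             return False
--         vistos.add(field)
--     return len(vistos) == 6
-- ===== Notes on version B (the rewrite author's own statement) =====
-- stated objective: alternative
-- what changed: Replaces A's two staged membership loops (required-over-input, then input-over-required) by a single pass over the dict keys with a seen-set accumulator: reject any non-required key immediately and finish by checking that 6 distinct required keys were seen.
import Mathlib
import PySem

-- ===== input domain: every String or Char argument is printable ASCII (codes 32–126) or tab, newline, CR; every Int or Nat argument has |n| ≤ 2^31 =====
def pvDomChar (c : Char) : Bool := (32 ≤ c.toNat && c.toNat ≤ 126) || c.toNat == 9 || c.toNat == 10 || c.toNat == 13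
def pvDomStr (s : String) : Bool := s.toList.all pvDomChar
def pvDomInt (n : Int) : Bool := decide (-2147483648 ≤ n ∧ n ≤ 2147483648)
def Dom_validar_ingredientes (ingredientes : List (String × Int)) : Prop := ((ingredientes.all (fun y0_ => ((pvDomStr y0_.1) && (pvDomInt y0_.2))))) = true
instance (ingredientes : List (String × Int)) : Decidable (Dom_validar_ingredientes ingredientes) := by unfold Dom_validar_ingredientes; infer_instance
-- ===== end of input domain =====

-- B replaces A's two staged membership loops by one pass over the dict keys with a
-- seen-set accumulator (reject non-required keys at once, count distinct seen at the end);
-- objective: alternative single-pass algorithm, same return value on every input.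

-- ===== PORT A =====
-- required_fields list of A
def pvRequiredFields : List String := ["bacon", "huevo", "pepino", "tomate", "cebolla", "lechuga"]

-- A: first loop = every required field is a key of the dict ('field in dict' tests keys);
-- second loop = every key is required; the early 'return False' loops become List.all.
def validar_ingredientes (ingredientes : List (String × Int)) : Bool :=
  if pvRequiredFields.all (fun field => (ingredientes.map (·.1)).contains field) then
    ingredientes.all (fun kv => pvRequiredFields.contains kv.1)
  else false

-- ===== PORT B =====
-- the 'required' set literal of B
def pvRequired : PySem.Set String :=
  PySem.Set.ofList ["bacon", "huevo", "pepino", "tomate", "cebolla", "lechuga"]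

-- B's loop: one pass over the keys, early False on a non-required key,
-- accumulating the distinct keys seen into 'vistos'
def pvGoB : List (String × Int) → PySem.Set String → Bool
  | [], vistos => PySem.Set.len vistos == 6
  | kv :: rest, vistos =>
    if PySem.Set.contains pvRequired kv.1 then pvGoB rest (PySem.Set.add vistos kv.1)
    else false

def validar_ingredientes_alt (ingredientes : List (String × Int)) : Bool :=
  pvGoB ingredientes PySem.Set.empty

-- ===== PRECONDITION & SPEC =====
def Spec_validar_ingredientes (ingredientes : List (String × Int)) (out : Bool) : Prop := out = validar_ingredientes_alt ingredientes
instance (ingredientes : List (String × Int)) (out : Bool) : Decidable (Spec_validar_ingredientes ingredientes out) := by unfold Spec_validar_ingredientes; infer_instance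

-- ===== CLAIM (what is proved, stated in full; the proofs are below) =====
def Claim_equal_validar_ingredientes : Prop := ∀ (ingredientes : List (String × Int)), Dom_validar_ingredientes ingredientes → Spec_validar_ingredientes ingredientes (validar_ingredientes ingredientes)

-- ===== LEMMAS AND PROOFS =====

-- B's loop computes: all keys required AND the set of keys accumulated onto 'vistos' has 6 elements
theorem pvGoB_spec (xs : List (String × Int)) (s : PySem.Set String) :
    pvGoB xs s =
      (xs.all (fun kv => PySem.Set.contains pvRequired kv.1) &&
        (PySem.Set.len (xs.foldl (fun t kv => PySem.Set.add t kv.1) s) == 6)) := by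
  induction xs generalizing s with
  | nil => simp [pvGoB]
  | cons kv rest ih =>
    simp only [pvGoB, List.all_cons, List.foldl_cons]
    by_cases h : kv.1 ∈ pvRequired
    · simp [PySem.Set.contains, h, ih]
    · simp [PySem.Set.contains, h]

theorem validar_ingredientes_spec : Claim_equal_validar_ingredientes := by
  intro xs _
  unfold Spec_validar_ingredientes validar_ingredientes validar_ingredientes_alt
  rw [pvGoB_spec]
  have hfold : xs.foldl (fun t kv => PySem.Set.add t kv.1) PySem.Set.empty
      = PySem.Set.ofList (xs.map (·.1)) := by
    rw [PySem.Set.ofList_eq_foldl, List.foldl_map]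
    rfl
  rw [hfold]
  by_cases hall : xs.all (fun kv => pvRequiredFields.contains kv.1) = true
  · -- every key is required; compare 'all required present' with 'card of key set = 6'
    have hall' : xs.all (fun kv => PySem.Set.contains pvRequired kv.1) = true := by
      simpa [pvRequired, pvRequiredFields, PySem.Set.contains] using hall
    rw [hall', Bool.true_and]
    have hkeys : ∀ k ∈ xs.map (·.1), k ∈ pvRequiredFields := by
      intro k hk
      rcases List.mem_map.1 hk with ⟨kv, hkv, rfl⟩
      have := (List.all_eq_true.1 hall) kv hkv
      simpa [List.contains_iff_mem] using this
    set d := PySem.Set.ofList (xs.map (·.1)) with hd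
    have hnodup : d.Nodup := PySem.Set.nodup_ofList _
    have hmemd : ∀ k, k ∈ d ↔ k ∈ xs.map (·.1) := fun k => PySem.Set.mem_ofList _ k
    have hsub : d.toFinset ⊆ pvRequiredFields.toFinset := by
      intro k hk
      simp only [List.mem_toFinset] at *
      exact hkeys k ((hmemd k).1 hk)
    have hcardR : pvRequiredFields.toFinset.card = 6 := by decide
    have hcardd : d.toFinset.card = d.length := List.toFinset_card_of_nodup hnodup
    split_ifs with hc
    · -- A's first loop succeeded: all six required keys are present
      have hsup : pvRequiredFields.toFinset ⊆ d.toFinset := by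
        intro k hk
        simp only [List.mem_toFinset] at *
        have := (List.all_eq_true.1 hc) k hk
        exact (hmemd k).2 ((List.contains_iff_mem).1 this)
      have heq : d.toFinset = pvRequiredFields.toFinset :=
        Finset.Subset.antisymm hsub hsup
      have h6 : d.length = 6 := by rw [← hcardd, heq, hcardR]
      rw [hall]
      simp [PySem.Set.len, h6]
    · -- A's first loop failed: some required key is missing, so the key set has < 6 elements
      symm
      rw [Bool.eq_false_iff]
      intro h6
      apply hc
      have h6' : d.length = 6 := by
        have := h6
        simp [PySem.Set.len] at this
        exact_mod_cast this
      have heq : d.toFinset = pvRequiredFields.toFinset := by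
        apply Finset.eq_of_subset_of_card_le hsub
        rw [hcardR, hcardd, h6']
      rw [List.all_eq_true]
      intro k hk
      have : k ∈ d.toFinset := by
        rw [heq]; simpa [List.mem_toFinset] using hk
      rw [List.contains_iff_mem]
      simp only [List.mem_toFinset] at this
      exact (hmemd k).1 this
  · -- some key is not required: both sides are false
    have hf : xs.all (fun kv => pvRequiredFields.contains kv.1) = false :=
      Bool.eq_false_iff.mpr hall
    have hall' : xs.all (fun kv => PySem.Set.contains pvRequired kv.1) = false := by
      rw [Bool.eq_false_iff]
      intro hc
      exact hall (by simpa [pvRequired, pvRequiredFields, PySem.Set.contains] using hc)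
    rw [hall', Bool.false_and]
    split_ifs with h
    · exact hf
    · rfl
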